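-- pv_equiv track=rewrite | github.com/koii-network/prometheus-beta | src/alternating_case.py | to_alternating_case
-- ===== SOURCE A (Python) =====
-- def to_alternating_case(text):
--     """
--     Convert a string to alternating case (SwApCaSe).
--
--     Args:
--         text (str): The input string to convert.
--
--     Returns:
--         str: The input string converted to alternating case.
--
--     Raises:
--         TypeError: If the input is not a string.
--
--     Examples:
--         >>> to_alternating_case("hello")
--         'HeLlO'
--         >>> to_alternating_case("WORLD")
--         'WoRlD'
--         >>> to_alternating_case("")
--         ''
--     """
--     # Validate input is a string
--     if not isinstance(text, str):
--         raise TypeError("Input must be a string")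
--
--     # Track index separately to reset for each word
--     result = []
--     word_index = 0
--
--     for char in text:
--         if char.isspace():
--             # Reset word index on spaces
--             word_index = 0
--             result.append(char)
--         else:
--             # Apply alternating case based on word index
--             result.append(
--                 char.upper() if word_index % 2 == 0 else char.lower()
--             )
--             word_index += 1
--
--     return ''.join(result)
-- ===== SOURCE B (Python) =====
-- from itertools import groupby
--
-- def to_alternating_case(text):
--     if not isinstance(text, str):
--         raise TypeError("Input must be a string")
--     parts = []
--     for is_space, run in groupby(text, key=str.isspace):
--         if is_space:
--             parts.extend(run)
--         else:
--             parts.append(''.join(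
--                 c.upper() if i % 2 == 0 else c.lower()
--                 for i, c in enumerate(run)))
--     return ''.join(parts)
-- ===== Notes on version B (the rewrite author's own statement) =====
-- stated objective: alternative
-- what changed: Replaces the single streaming loop with a resetting word counter by an itertools.groupby split into whitespace/non-whitespace runs, mapping each word run through an enumerate-based alternating-case join.
import Mathlib
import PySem

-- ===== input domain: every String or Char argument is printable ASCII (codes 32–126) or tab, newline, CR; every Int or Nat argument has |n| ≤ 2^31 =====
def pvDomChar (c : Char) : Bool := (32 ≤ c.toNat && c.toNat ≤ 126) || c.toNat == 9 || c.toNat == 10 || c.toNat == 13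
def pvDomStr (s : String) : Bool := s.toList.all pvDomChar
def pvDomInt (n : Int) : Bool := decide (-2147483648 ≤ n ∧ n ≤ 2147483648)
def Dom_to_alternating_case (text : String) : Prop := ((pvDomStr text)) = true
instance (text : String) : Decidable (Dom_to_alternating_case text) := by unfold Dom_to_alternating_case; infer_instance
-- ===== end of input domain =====

-- B replaces A's single streaming loop with a resetting word counter by a group-into-runs
-- (whitespace / non-whitespace) decomposition, mapping each word run independently (objective: alternative).

-- ===== PORT A =====
-- literal transliteration: foldl over the characters carrying (result, word_index)
def to_alternating_case (text : String) : String :=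
  String.mk (text.toList.foldl
    (fun (st : List Char × Nat) (c : Char) =>
      if PySem.Chars.isspace c then (st.1 ++ [c], 0)
      else (st.1 ++ [if st.2 % 2 = 0 then PySem.Chars.upperChar c
                     else PySem.Chars.lowerChar c], st.2 + 1))
    ([], 0)).1

-- ===== PORT B =====
-- ''.join(c.upper() if i % 2 = 0 else c.lower() for i, c in enumerate(run))
def pvAltWord : Nat → List Char → List Char
  | _, [] => []
  | i, c :: cs =>
      (if i % 2 = 0 then PySem.Chars.upperChar c else PySem.Chars.lowerChar c)
        :: pvAltWord (i + 1) cs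

-- groupby(text, key=str.isspace): peel off maximal runs of equal isspace-key
def pvRuns : List Char → List Char
  | [] => []
  | c :: cs =>
      if h : PySem.Chars.isspace c then
        ((c :: cs).takeWhile PySem.Chars.isspace)
          ++ pvRuns ((c :: cs).dropWhile PySem.Chars.isspace)
      else
        pvAltWord 0 ((c :: cs).takeWhile (fun d => !PySem.Chars.isspace d))
          ++ pvRuns ((c :: cs).dropWhile (fun d => !PySem.Chars.isspace d))
  termination_by cs => cs.length
  decreasing_by
    · simp [List.dropWhile, h]
      exact List.length_dropWhile_le _ _
    · simp [List.dropWhile, h]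
      exact List.length_dropWhile_le _ _

def to_alternating_case_alt (text : String) : String :=
  String.mk (pvRuns text.toList)

-- ===== PRECONDITION & SPEC =====
def Spec_to_alternating_case (text : String) (out : String) : Prop := out = to_alternating_case_alt text
instance (text : String) (out : String) : Decidable (Spec_to_alternating_case text out) := by unfold Spec_to_alternating_case; infer_instance

-- ===== CLAIM (what is proved, stated in full; the proofs are below) =====
def Claim_equal_to_alternating_case : Prop := ∀ (text : String), Dom_to_alternating_case text → Spec_to_alternating_case text (to_alternating_case text)

-- ===== LEMMAS AND PROOFS =====

-- mathematical reading of A's loop: remaining characters × current word index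
def pvG : List Char → Nat → List Char
  | [], _ => []
  | c :: cs, wi =>
      if PySem.Chars.isspace c then c :: pvG cs 0
      else (if wi % 2 = 0 then PySem.Chars.upperChar c
            else PySem.Chars.lowerChar c) :: pvG cs (wi + 1)

lemma pvA_fold (cs : List Char) : ∀ (acc : List Char) (wi : Nat),
    (cs.foldl
      (fun (st : List Char × Nat) (c : Char) =>
        if PySem.Chars.isspace c then (st.1 ++ [c], 0)
        else (st.1 ++ [if st.2 % 2 = 0 then PySem.Chars.upperChar c
                       else PySem.Chars.lowerChar c], st.2 + 1))
      (acc, wi)).1 = acc ++ pvG cs wi := by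
  induction cs with
  | nil => intro acc wi; simp [pvG]
  | cons c cs ih =>
      intro acc wi
      by_cases h : PySem.Chars.isspace c <;>
        simp [pvG, h, ih, List.append_assoc]

lemma pvG_space_head (r : List Char) (n : Nat)
    (h : r = [] ∨ ∃ c cs, r = c :: cs ∧ PySem.Chars.isspace c) :
    pvG r n = pvG r 0 := by
  rcases h with h | ⟨c, cs, rfl, hc⟩
  · subst h; rfl
  · simp [pvG, hc]

lemma pvG_space_run (t : List Char) (r : List Char)
    (ht : ∀ c ∈ t, PySem.Chars.isspace c) :
    pvG (t ++ r) 0 = t ++ pvG r 0 := by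
  induction t with
  | nil => simp
  | cons c cs ih =>
      have hc : PySem.Chars.isspace c := ht c (by simp)
      simp only [List.cons_append, pvG, hc, if_pos]
      simp [ih (fun d hd => ht d (by simp [hd]))]

lemma pvG_word_run (t : List Char) : ∀ (r : List Char) (k : Nat),
    (∀ c ∈ t, ¬ PySem.Chars.isspace c) →
    pvG (t ++ r) k = pvAltWord k t ++ pvG r (k + t.length) := by
  induction t with
  | nil => intro r k _; simp [pvAltWord]
  | cons c cs ih =>
      intro r k ht
      have hc : ¬ PySem.Chars.isspace c := ht c (by simp)
      simp only [List.cons_append, pvG, hc, pvAltWord]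
      rw [ih r (k + 1) (fun d hd => ht d (by simp [hd]))]
      simp [Nat.add_comm, Nat.add_left_comm]

lemma pv_dropWhile_shape (p : Char → Bool) (l : List Char) :
    l.dropWhile p = [] ∨ ∃ c cs, l.dropWhile p = c :: cs ∧ p c = false := by
  induction l with
  | nil => left; rfl
  | cons c cs ih =>
      by_cases h : p c
      · simpa [List.dropWhile, h] using ih
      · right; exact ⟨c, cs, by simp [List.dropWhile, h], by simp [h]⟩

lemma pvRuns_eq_pvG (cs : List Char) : pvRuns cs = pvG cs 0 := by
  induction cs using pvRuns.induct with
  | case1 => simp [pvRuns, pvG]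
  | case2 c cs h ih =>
      rw [pvRuns, dif_pos h, ih]
      conv_rhs => rw [← List.takeWhile_append_dropWhile (p := PySem.Chars.isspace) (l := c :: cs)]
      exact (pvG_space_run _ _ (fun d hd => List.mem_takeWhile_imp hd)).symm
  | case3 c cs h ih =>
      rw [pvRuns, dif_neg h, ih]
      conv_rhs => rw [← List.takeWhile_append_dropWhile
        (p := fun d => !PySem.Chars.isspace d) (l := c :: cs)]
      rw [pvG_word_run _ _ _ (fun d hd => by simpa using List.mem_takeWhile_imp hd)]
      congr 1
      refine (pvG_space_head _ _ ?_).symm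
      rcases pv_dropWhile_shape (fun d => !PySem.Chars.isspace d) (c :: cs) with h0 | ⟨d, ds, hd, hpd⟩
      · left; exact h0
      · right; exact ⟨d, ds, hd, by simpa using hpd⟩

-- ===== VERDICT (by name: the statement is the Claim_ definition above) =====
theorem to_alternating_case_spec : Claim_equal_to_alternating_case := by
  intro text _
  unfold Spec_to_alternating_case to_alternating_case to_alternating_case_alt
  rw [pvA_fold, pvRuns_eq_pvG]
  simp
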